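-- pv_equiv track=rewrite | github.com/0ginny/TIL | Coding_Test_Practice/bakjune/4659.py | check
-- ===== SOURCE A (Python) =====
-- mo = list('aeiou')
--
-- def check(word) -> bool:
--     last = ''
--     # 모음이 반드시 하나 이상
--     one = False
--     for m in mo:
--         if m in word:
--             one = True
--             break
--     if one == False:
--         return False
--
--     # 자음 모음 3번 연속 안됨
--     cnt = 0
--     is_mo = False
--     for s in word:
--         if s in mo:
--             if is_mo == False:
--                 is_mo = True
--                 cnt = 1
--             else :
--                 cnt += 1
--         else : # 자음일 경우
--             if is_mo == True:
--                 cnt = 1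
--                 is_mo =False
--             else: # 이전 자음
--                 cnt += 1
--         if cnt >= 3 :
--             return False
--
--         # 같은 글자가 연속으로 2번 온다면
--         if s == last:
--             if s not in ['e','o']: # 심지어 e, o 도 아니라면
--                 return False
--         else :
--             last = s
--     # 모든 조건을 통과 했을 때
--     return True
-- ===== SOURCE B (Python) =====
-- import re
--
-- def check(word) -> bool:
--     # Rules evaluated independently via regex: has a vowel; no 3-run of
--     # vowels or of consonants; no adjacent identical pair other than e/o.
--     return (re.search('[aeiou]', word) is not None
--             and re.search('[aeiou]{3}', word) is None
--             and re.search('[^aeiou]{3}', word) is None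
--             and re.search(r'([^eo])\1', word) is None)
-- ===== Notes on version B (the rewrite author's own statement) =====
-- stated objective: idiomatic
-- what changed: Replaces the hand-written single-pass state machine (run counter, vowel flag, last-char tracking with early returns) by four independent regex rules combined with a conjunction.
import Mathlib
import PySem

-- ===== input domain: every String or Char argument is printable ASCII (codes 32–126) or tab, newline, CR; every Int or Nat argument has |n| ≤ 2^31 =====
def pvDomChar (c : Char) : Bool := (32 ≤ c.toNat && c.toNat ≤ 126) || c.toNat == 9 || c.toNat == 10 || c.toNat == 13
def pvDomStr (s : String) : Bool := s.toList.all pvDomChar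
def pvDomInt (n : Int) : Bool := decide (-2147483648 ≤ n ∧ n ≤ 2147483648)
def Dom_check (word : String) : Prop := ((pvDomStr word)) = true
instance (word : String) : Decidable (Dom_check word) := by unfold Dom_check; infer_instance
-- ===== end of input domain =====

-- B replaces A's manual single-pass state machine by four independent regex rules (idiomatic).

-- ===== PORT A =====
def moList : List Char := ['a', 'e', 'i', 'o', 'u']

-- A's main for-loop: state (last, cnt, is_mo), early return on a 3-run or a bad adjacent pair
def loopA (last : Option Char) (cnt : Int) (ismo : Bool) : List Char → Bool
  | [] => true
  | s :: xs =>
    let st : Int × Bool :=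
      if moList.contains s then
        (if ismo = false then ((1 : Int), true) else (cnt + 1, true))
      else
        (if ismo = true then ((1 : Int), false) else (cnt + 1, false))
    if st.1 ≥ 3 then false
    else
      if some s = last then
        (if ¬ (s = 'e' ∨ s = 'o') then false else loopA last st.1 st.2 xs)
      else loopA (some s) st.1 st.2 xs

def check (word : String) : Bool :=
  -- for m in mo: if m in word: one = True; break   (a 1-char 'm in word' is a membership test)
  let one := moList.any (fun m => word.toList.contains m)
  if one = false then false
  else loopA none 0 false word.toList

-- ===== PORT B =====
-- the character class [aeiou]
def vowB (c : Char) : Bool := c == 'a' || c == 'e' || c == 'i' || c == 'o' || c == 'u'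

-- re.search('[aeiou]', w) is not None
def searchVowel (l : List Char) : Bool := l.any vowB

-- re.search('<class>{3}', w) is not None: three consecutive chars matching p
def searchRun3 (p : Char → Bool) : List Char → Bool
  | a :: b :: c :: r => (p a && p b && p c) || searchRun3 p (b :: c :: r)
  | _ => false

-- re.search(r'([^eo])\1', w) is not None: adjacent identical pair whose char is not e/o
def searchDup : List Char → Bool
  | a :: b :: r => (a == b && !(a == 'e') && !(a == 'o')) || searchDup (b :: r)
  | _ => false

def check_alt (word : String) : Bool :=
  let cs := word.toList
  searchVowel cs && !searchRun3 vowB cs && !searchRun3 (fun c => !vowB c) cs && !searchDup cs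

-- ===== PRECONDITION & SPEC =====
def Spec_check (word : String) (out : Bool) : Prop := out = check_alt word
instance (word : String) (out : Bool) : Decidable (Spec_check word out) := by unfold Spec_check; infer_instance

-- ===== CLAIM (what is proved, stated in full; the proofs are below) =====
def Claim_equal_check : Prop := ∀ (word : String), Dom_check word → Spec_check word (check word)

-- ===== LEMMAS AND PROOFS =====

-- pure (no-early-return) version of A's 3-run detection
def tripleFrom : Int → Bool → List Char → Bool
  | _, _, [] => false
  | cnt, ismo, s :: xs =>
    let cnt' : Int := if vowB s = ismo then cnt + 1 else 1
    (cnt' ≥ 3) || tripleFrom cnt' (vowB s) xs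

-- pure version of A's bad-pair detection
def pairFrom : Option Char → List Char → Bool
  | _, [] => false
  | last, s :: xs =>
    if some s = last then (if ¬ (s = 'e' ∨ s = 'o') then true else pairFrom last xs)
    else pairFrom (some s) xs

-- windows of width 3 with equal vowel-class (intermediate between A's counter and B's two runs)
def triple3 : List Char → Bool
  | a :: b :: c :: r => (vowB a == vowB b && vowB b == vowB c) || triple3 (b :: c :: r)
  | _ => false

theorem contains_eq_vowB (c : Char) : moList.contains c = vowB c := by
  simp only [moList, vowB, List.contains_cons, List.contains_nil, Bool.or_false, Bool.or_assoc]

theorem any_swap (l : List Char) : (moList.any fun m => l.contains m) = l.any vowB := by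
  rw [Bool.eq_iff_iff]
  simp only [List.any_eq_true, List.contains_iff_mem, moList, vowB, List.mem_cons,
    List.not_mem_nil, or_false, Bool.or_eq_true, beq_iff_eq]
  constructor
  · rintro ⟨m, hm, h⟩; exact ⟨m, h, by tauto⟩
  · rintro ⟨c, hc, h⟩; exact ⟨c, by tauto, hc⟩

theorem loopA_eq (xs : List Char) : ∀ last cnt ismo,
    loopA last cnt ismo xs = !(tripleFrom cnt ismo xs || pairFrom last xs) := by
  induction xs with
  | nil => intro last cnt ismo; simp [loopA, tripleFrom, pairFrom]
  | cons s xs ih =>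
    intro last cnt ismo
    simp only [loopA, tripleFrom, pairFrom, contains_eq_vowB]
    cases hv : vowB s <;> cases ismo <;>
      simp only [Bool.false_eq_true, Bool.true_eq_false, if_true, if_false] <;>
      split_ifs <;> simp_all [ih] <;>
      (have hle : ¬ (3:Int) ≤ cnt + 1 := by omega) <;> simp [hle]

theorem pairFrom_eq (xs : List Char) : ∀ a, pairFrom (some a) xs = searchDup (a :: xs) := by
  induction xs with
  | nil => intro a; simp [pairFrom, searchDup]
  | cons s ys ih =>
    intro a
    simp only [pairFrom, searchDup]
    by_cases hsa : s = a
    · subst hsa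
      by_cases heo : s = 'e' ∨ s = 'o'
      · have h1 : (s == s && !(s == 'e') && !(s == 'o')) = false := by
          rcases heo with h | h <;> subst h <;> simp
        rw [if_pos rfl, if_neg (not_not_intro heo), h1, Bool.false_or, ih s]
      · have h1 : (s == s && !(s == 'e') && !(s == 'o')) = true := by
          simp only [Bool.and_eq_true, beq_self_eq_true, Bool.not_eq_true', beq_eq_false_iff_ne,
            ne_eq]
          tauto
        rw [if_pos rfl, if_pos heo, h1, Bool.true_or]
    · have h0 : (a == s) = false := by
        simp only [beq_eq_false_iff_ne, ne_eq]
        exact fun h => hsa h.symm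
      simp [show ¬ some s = some a by simp [hsa], h0, ih]

theorem tripleFrom_eq (xs : List Char) : ∀ a,
    (tripleFrom 1 (vowB a) xs = triple3 (a :: xs)) ∧
    (∀ b, vowB b = vowB a → tripleFrom 2 (vowB a) xs = triple3 (b :: a :: xs)) := by
  induction xs with
  | nil =>
    intro a
    exact ⟨by simp [tripleFrom, triple3], fun b _ => by simp [tripleFrom, triple3]⟩
  | cons s ys ih =>
    intro a
    constructor
    · by_cases h : vowB s = vowB a
      · have h2 := (ih s).2 a h.symm
        simp only [tripleFrom, if_pos h]
        have : ¬ (3:Int) ≤ 1 + 1 := by omega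
        simp only [ge_iff_le, this, decide_false, Bool.false_or]
        rw [show (1:Int) + 1 = 2 by norm_num, h2]
      · have h1 := (ih s).1
        simp only [tripleFrom, if_neg h]
        have : ¬ (3:Int) ≤ 1 := by omega
        simp only [ge_iff_le, this, decide_false, Bool.false_or]
        rw [h1]
        cases ys with
        | nil => simp [triple3]
        | cons c r =>
          have hw : (vowB a == vowB s) = false := by
            simp only [beq_eq_false_iff_ne, ne_eq]; exact fun hh => h hh.symm
          simp [triple3, hw]
    · intro b hb
      by_cases h : vowB s = vowB a
      · simp only [tripleFrom, if_pos h]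
        have h3 : (3:Int) ≤ 2 + 1 := by omega
        have hw : (vowB b == vowB a && vowB a == vowB s) = true := by simp [hb, h.symm]
        simp [triple3, hw, h3]
      · have h1 := (ih s).1
        simp only [tripleFrom, if_neg h]
        have : ¬ (3:Int) ≤ 1 := by omega
        simp only [ge_iff_le, this, decide_false, Bool.false_or]
        rw [h1]
        have hw2 : (vowB a == vowB s) = false := by
          simp only [beq_eq_false_iff_ne, ne_eq]; exact fun hh => h hh.symm
        cases ys with
        | nil => simp [triple3, hw2]
        | cons c r => simp [triple3, hw2]

theorem triple3_split (xs : List Char) :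
    triple3 xs = (searchRun3 vowB xs || searchRun3 (fun c => !vowB c) xs) := by
  induction xs with
  | nil => simp [triple3, searchRun3]
  | cons a xs ih =>
    cases xs with
    | nil => simp [triple3, searchRun3]
    | cons b ys =>
      cases ys with
      | nil => simp [triple3, searchRun3]
      | cons c r =>
        simp only [triple3, searchRun3, ih]
        cases hva : vowB a <;> cases hvb : vowB b <;> cases hvc : vowB c <;> simp

theorem tripleFrom_init (xs : List Char) : tripleFrom 0 false xs = triple3 xs := by
  cases xs with
  | nil => simp [tripleFrom, triple3]
  | cons a ys =>
    have h1 : tripleFrom 0 false (a :: ys) = tripleFrom 1 (vowB a) ys := by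
      simp only [tripleFrom]
      cases hv : vowB a <;> norm_num
    rw [h1, (tripleFrom_eq ys a).1]

theorem pairFrom_init (xs : List Char) : pairFrom none xs = searchDup xs := by
  cases xs with
  | nil => simp [pairFrom, searchDup]
  | cons a ys =>
    have h : pairFrom none (a :: ys) = pairFrom (some a) ys := by simp [pairFrom]
    rw [h, pairFrom_eq ys a]

-- ===== VERDICT (by name: the statement is the Claim_ definition above) =====
theorem check_spec : Claim_equal_check := by
  intro word _
  unfold Spec_check check check_alt
  rw [any_swap]
  cases h : word.toList.any vowB with
  | false => simp [searchVowel, h]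
  | true =>
    simp only [h, Bool.true_eq_false, if_false]
    rw [loopA_eq, tripleFrom_init, pairFrom_init, triple3_split]
    simp only [searchVowel, h, Bool.true_and, Bool.not_or]
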